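-- pv_equiv track=rewrite | github.com/avi-natan/MGSD | statics.py | calculate_dichotomy_matrix
-- ===== SOURCE A (Python) =====
-- from typing import List, Dict, Callable
--
-- def calculate_dichotomy_matrix(spectra: List[List[int]], error_vector: List[int]) -> List[List[int]]:
--     dichotomy_matrix = [[],  # n11
--                         [],  # n10
--                         [],  # n01
--                         []]  # n00
--     for cj in range(len(spectra[0])):
--         n11, n10, n01, n00 = 0, 0, 0, 0
--         cj_vector = [spectra[i][cj] for i in range(len(spectra))]
--         for i in range(len(cj_vector)):
--             if cj_vector[i] == 1 and error_vector[i] == 1: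
--                 n11 += 1
--             elif cj_vector[i] == 1 and error_vector[i] == 0:
--                 n10 += 1
--             elif cj_vector[i] == 0 and error_vector[i] == 1:
--                 n01 += 1
--             else:
--                 n00 += 1
--         dichotomy_matrix[0].append(n11)
--         dichotomy_matrix[1].append(n10)
--         dichotomy_matrix[2].append(n01)
--         dichotomy_matrix[3].append(n00)
--     return dichotomy_matrix
-- ===== SOURCE B (Python) =====
-- def calculate_dichotomy_matrix(spectra, error_vector):
--     ncols = len(spectra[0])
--     n = len(spectra)
--     n11 = [sum(1 for i in range(n) if spectra[i][cj] == 1 and error_vector[i] == 1)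
--            for cj in range(ncols)]
--     n10 = [sum(1 for i in range(n) if spectra[i][cj] == 1 and error_vector[i] == 0)
--            for cj in range(ncols)]
--     n01 = [sum(1 for i in range(n) if spectra[i][cj] == 0 and error_vector[i] == 1)
--            for cj in range(ncols)]
--     n00 = [n - a - b - c for a, b, c in zip(n11, n10, n01)]
--     return [n11, n10, n01, n00]
-- ===== Notes on version B (the rewrite author's own statement) =====
-- stated objective: alternative
-- what changed: B replaces A's single column-major pass with a four-way if/elif over an intermediate column vector by three staged counting passes (one sum-comprehension per (value,error) category) and derives the catch-all n00 per column as rows minus the other three counts.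
import Mathlib
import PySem

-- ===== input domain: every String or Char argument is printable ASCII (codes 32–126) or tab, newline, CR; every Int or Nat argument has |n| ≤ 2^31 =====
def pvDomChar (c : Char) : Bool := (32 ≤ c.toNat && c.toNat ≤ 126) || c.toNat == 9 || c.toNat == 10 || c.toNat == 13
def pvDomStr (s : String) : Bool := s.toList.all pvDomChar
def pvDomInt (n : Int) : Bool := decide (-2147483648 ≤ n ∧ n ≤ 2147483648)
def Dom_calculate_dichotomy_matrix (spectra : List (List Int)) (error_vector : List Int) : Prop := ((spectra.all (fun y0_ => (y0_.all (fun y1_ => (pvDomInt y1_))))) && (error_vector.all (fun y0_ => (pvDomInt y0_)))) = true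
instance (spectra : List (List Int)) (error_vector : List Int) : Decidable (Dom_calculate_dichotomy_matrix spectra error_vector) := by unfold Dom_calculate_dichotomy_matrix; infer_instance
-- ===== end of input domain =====

-- B replaces A's single column-major pass with its four-way if/elif by three staged counting
-- passes (one sum-comprehension per category) plus n00 derived by subtraction (objective: alternative).

-- ===== PORT A =====
def calculate_dichotomy_matrix (spectra : List (List Int)) (error_vector : List Int) : List (List Int) :=
  let dm :=
    (PySem.List.pyRange 0 (PySem.List.len (PySem.List.pyGetD spectra 0 [])) 1).foldl
      (fun (dm : List Int × List Int × List Int × List Int) cj =>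
        let cj_vector := (PySem.List.pyRange 0 (PySem.List.len spectra) 1).map
          (fun i => PySem.List.pyGetD (PySem.List.pyGetD spectra i []) cj 0)
        let c := (PySem.List.pyRange 0 (PySem.List.len cj_vector) 1).foldl
          (fun (c : Int × Int × Int × Int) i =>
            if PySem.List.pyGetD cj_vector i 0 = 1 ∧ PySem.List.pyGetD error_vector i 0 = 1 then
              (c.1 + 1, c.2.1, c.2.2.1, c.2.2.2)
            else if PySem.List.pyGetD cj_vector i 0 = 1 ∧ PySem.List.pyGetD error_vector i 0 = 0 then
              (c.1, c.2.1 + 1, c.2.2.1, c.2.2.2)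
            else if PySem.List.pyGetD cj_vector i 0 = 0 ∧ PySem.List.pyGetD error_vector i 0 = 1 then
              (c.1, c.2.1, c.2.2.1 + 1, c.2.2.2)
            else (c.1, c.2.1, c.2.2.1, c.2.2.2 + 1))
          ((0 : Int), (0 : Int), (0 : Int), (0 : Int))
        (dm.1 ++ [c.1], dm.2.1 ++ [c.2.1], dm.2.2.1 ++ [c.2.2.1], dm.2.2.2 ++ [c.2.2.2]))
      ([], [], [], [])
  [dm.1, dm.2.1, dm.2.2.1, dm.2.2.2]

-- ===== PORT B =====
def calculate_dichotomy_matrix_alt (spectra : List (List Int)) (error_vector : List Int) : List (List Int) :=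
  let ncols := PySem.List.len (PySem.List.pyGetD spectra 0 [])
  let n := PySem.List.len spectra
  let n11 := (PySem.List.pyRange 0 ncols 1).map (fun cj =>
    (PySem.List.pyRange 0 n 1).foldl (fun s i =>
      if PySem.List.pyGetD (PySem.List.pyGetD spectra i []) cj 0 = 1
          ∧ PySem.List.pyGetD error_vector i 0 = 1 then s + 1 else s) (0 : Int))
  let n10 := (PySem.List.pyRange 0 ncols 1).map (fun cj =>
    (PySem.List.pyRange 0 n 1).foldl (fun s i =>
      if PySem.List.pyGetD (PySem.List.pyGetD spectra i []) cj 0 = 1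
          ∧ PySem.List.pyGetD error_vector i 0 = 0 then s + 1 else s) (0 : Int))
  let n01 := (PySem.List.pyRange 0 ncols 1).map (fun cj =>
    (PySem.List.pyRange 0 n 1).foldl (fun s i =>
      if PySem.List.pyGetD (PySem.List.pyGetD spectra i []) cj 0 = 0
          ∧ PySem.List.pyGetD error_vector i 0 = 1 then s + 1 else s) (0 : Int))
  let n00 := (n11.zip (n10.zip n01)).map (fun t => n - t.1 - t.2.1 - t.2.2)
  [n11, n10, n01, n00]

-- ===== PRECONDITION & SPEC =====
-- Pre_ excludes exactly the inputs on which Python A raises IndexError: empty spectra, a row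
-- shorter than the first row, or a row past error_vector's length holding a 0/1 entry in the
-- first len(spectra[0]) columns (only such entries make A's short-circuit index error_vector).
def Pre_calculate_dichotomy_matrix (spectra : List (List Int)) (error_vector : List Int) : Prop :=
  spectra ≠ [] ∧ (∀ row ∈ spectra, (spectra.headD []).length ≤ row.length) ∧
    (∀ i ∈ List.range spectra.length, error_vector.length ≤ i →
      ∀ v ∈ (spectra.getD i []).take (spectra.headD []).length, ¬(v = 0 ∨ v = 1))
instance (spectra : List (List Int)) (error_vector : List Int) : Decidable (Pre_calculate_dichotomy_matrix spectra error_vector) := by unfold Pre_calculate_dichotomy_matrix; infer_instance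

def pvWitness_calculate_dichotomy_matrix : List (List Int) × List Int := ([[1, 0], [0, 1]], [1, 0])

def Spec_calculate_dichotomy_matrix (spectra : List (List Int)) (error_vector : List Int) (out : List (List Int)) : Prop := out = calculate_dichotomy_matrix_alt spectra error_vector
instance (spectra : List (List Int)) (error_vector : List Int) (out : List (List Int)) : Decidable (Spec_calculate_dichotomy_matrix spectra error_vector out) := by unfold Spec_calculate_dichotomy_matrix; infer_instance

-- ===== CLAIM (what is proved, stated in full; the proofs are below) =====
def Claim_equal_calculate_dichotomy_matrix : Prop := ∀ (spectra : List (List Int)) (error_vector : List Int), Dom_calculate_dichotomy_matrix spectra error_vector → Pre_calculate_dichotomy_matrix spectra error_vector → Spec_calculate_dichotomy_matrix spectra error_vector (calculate_dichotomy_matrix spectra error_vector)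

-- ===== LEMMAS AND PROOFS =====

-- number of rows i < n whose (value, error) pair equals q
def pvCount (v e : Int → Int) (n : Nat) (q : Int × Int) : Int :=
  (((PySem.List.pyRange 0 (n : Int) 1).map (fun i => (v i, e i))).count q : Int)

theorem pv_count_succ (v e : Int → Int) (n : Nat) (q : Int × Int) :
    pvCount v e (n + 1) q = pvCount v e n q + (if (v n, e n) = q then 1 else 0) := by
  have hsplit : PySem.List.pyRange 0 ((n + 1 : Nat) : Int) 1
      = PySem.List.pyRange 0 (n : Int) 1 ++ [(n : Int)] := by
    have hcast : ((n + 1 : Nat) : Int) = (n : Int) + 1 := by omega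
    rw [hcast, PySem.List.pyRange_one_succ_right]
    omega
  simp only [pvCount, hsplit, List.map_append, List.count_append, List.map_cons,
    List.map_nil, List.count_cons, List.count_nil, beq_iff_eq]
  split_ifs <;> simp

-- A's four-way branch fold computes the three pair-counts, with n00 the complement.
theorem pv_counts_fold (v e : Int → Int) (n : Nat) :
    (PySem.List.pyRange 0 (n : Int) 1).foldl
      (fun (c : Int × Int × Int × Int) i =>
        if v i = 1 ∧ e i = 1 then (c.1 + 1, c.2.1, c.2.2.1, c.2.2.2)
        else if v i = 1 ∧ e i = 0 then (c.1, c.2.1 + 1, c.2.2.1, c.2.2.2)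
        else if v i = 0 ∧ e i = 1 then (c.1, c.2.1, c.2.2.1 + 1, c.2.2.2)
        else (c.1, c.2.1, c.2.2.1, c.2.2.2 + 1))
      ((0 : Int), (0 : Int), (0 : Int), (0 : Int))
    = (pvCount v e n (1, 1), pvCount v e n (1, 0), pvCount v e n (0, 1),
       (n : Int) - pvCount v e n (1, 1) - pvCount v e n (1, 0) - pvCount v e n (0, 1)) := by
  induction n with
  | zero =>
    simp [pvCount, PySem.List.pyRange_one_eq_nil]
  | succ n ih =>
    have hsplit : PySem.List.pyRange 0 ((n + 1 : Nat) : Int) 1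
        = PySem.List.pyRange 0 (n : Int) 1 ++ [(n : Int)] := by
      have hcast : ((n + 1 : Nat) : Int) = (n : Int) + 1 := by omega
      rw [hcast, PySem.List.pyRange_one_succ_right]
      omega
    rw [hsplit, List.foldl_append, ih]
    simp only [List.foldl_cons, List.foldl_nil, pv_count_succ]
    by_cases hv1 : v n = 1 <;> by_cases hv0 : v n = 0 <;>
      by_cases he1 : e n = 1 <;> by_cases he0 : e n = 0 <;>
      simp_all [Prod.ext_iff] <;> omega

-- B's counting fold for one category is the same pair-count.
theorem pv_count_fold (v e : Int → Int) (n : Nat) (q1 q2 : Int) :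
    (PySem.List.pyRange 0 (n : Int) 1).foldl
      (fun (s : Int) i => if v i = q1 ∧ e i = q2 then s + 1 else s) (0 : Int)
    = pvCount v e n (q1, q2) := by
  induction n with
  | zero =>
    simp [pvCount, PySem.List.pyRange_one_eq_nil]
  | succ n ih =>
    have hsplit : PySem.List.pyRange 0 ((n + 1 : Nat) : Int) 1
        = PySem.List.pyRange 0 (n : Int) 1 ++ [(n : Int)] := by
      have hcast : ((n + 1 : Nat) : Int) = (n : Int) + 1 := by omega
      rw [hcast, PySem.List.pyRange_one_succ_right]
      omega
    rw [hsplit, List.foldl_append, ih]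
    simp only [List.foldl_cons, List.foldl_nil, pv_count_succ]
    by_cases h1 : v n = q1 <;> by_cases h2 : e n = q2 <;> simp_all [Prod.ext_iff]

-- appending one element per iteration to four lists is a fourfold map
theorem pv_foldl_app4 (l : List Int) (F : Int → Int × Int × Int × Int)
    (a : List Int × List Int × List Int × List Int) :
    l.foldl (fun acc cj => (acc.1 ++ [(F cj).1], acc.2.1 ++ [(F cj).2.1],
      acc.2.2.1 ++ [(F cj).2.2.1], acc.2.2.2 ++ [(F cj).2.2.2])) a
    = (a.1 ++ l.map (fun cj => (F cj).1), a.2.1 ++ l.map (fun cj => (F cj).2.1),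
       a.2.2.1 ++ l.map (fun cj => (F cj).2.2.1), a.2.2.2 ++ l.map (fun cj => (F cj).2.2.2)) := by
  induction l generalizing a with
  | nil => simp
  | cons x xs ih => simp [ih]

-- the closed form of one column: the three pair-counts and the complement
def pvG (spectra : List (List Int)) (error_vector : List Int) (cj : Int) : Int × Int × Int × Int :=
  (pvCount (fun i => PySem.List.pyGetD (PySem.List.pyGetD spectra i []) cj 0)
     (fun i => PySem.List.pyGetD error_vector i 0) spectra.length (1, 1),
   pvCount (fun i => PySem.List.pyGetD (PySem.List.pyGetD spectra i []) cj 0)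
     (fun i => PySem.List.pyGetD error_vector i 0) spectra.length (1, 0),
   pvCount (fun i => PySem.List.pyGetD (PySem.List.pyGetD spectra i []) cj 0)
     (fun i => PySem.List.pyGetD error_vector i 0) spectra.length (0, 1),
   ((spectra.length : Nat) : Int)
     - pvCount (fun i => PySem.List.pyGetD (PySem.List.pyGetD spectra i []) cj 0)
         (fun i => PySem.List.pyGetD error_vector i 0) spectra.length (1, 1)
     - pvCount (fun i => PySem.List.pyGetD (PySem.List.pyGetD spectra i []) cj 0)
         (fun i => PySem.List.pyGetD error_vector i 0) spectra.length (1, 0)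
     - pvCount (fun i => PySem.List.pyGetD (PySem.List.pyGetD spectra i []) cj 0)
         (fun i => PySem.List.pyGetD error_vector i 0) spectra.length (0, 1))

-- A's per-column inner computation equals the closed form
theorem pv_colA (spectra : List (List Int)) (error_vector : List Int) (cj : Int) :
    (let cj_vector := (PySem.List.pyRange 0 (PySem.List.len spectra) 1).map
        (fun i => PySem.List.pyGetD (PySem.List.pyGetD spectra i []) cj 0)
     (PySem.List.pyRange 0 (PySem.List.len cj_vector) 1).foldl
        (fun (c : Int × Int × Int × Int) i =>
          if PySem.List.pyGetD cj_vector i 0 = 1 ∧ PySem.List.pyGetD error_vector i 0 = 1 then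
            (c.1 + 1, c.2.1, c.2.2.1, c.2.2.2)
          else if PySem.List.pyGetD cj_vector i 0 = 1 ∧ PySem.List.pyGetD error_vector i 0 = 0 then
            (c.1, c.2.1 + 1, c.2.2.1, c.2.2.2)
          else if PySem.List.pyGetD cj_vector i 0 = 0 ∧ PySem.List.pyGetD error_vector i 0 = 1 then
            (c.1, c.2.1, c.2.2.1 + 1, c.2.2.2)
          else (c.1, c.2.1, c.2.2.1, c.2.2.2 + 1))
        ((0 : Int), (0 : Int), (0 : Int), (0 : Int)))
    = pvG spectra error_vector cj := by
  have h2 : (PySem.List.pyRange 0 ((spectra.length : Nat) : Int) 1).foldl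
      (fun (c : Int × Int × Int × Int) i =>
        if PySem.List.pyGetD (List.map (fun j => PySem.List.pyGetD (PySem.List.pyGetD spectra j []) cj 0) (PySem.List.pyRange 0 ((spectra.length : Nat) : Int) 1)) i 0 = 1 ∧ PySem.List.pyGetD error_vector i 0 = 1 then
          (c.1 + 1, c.2.1, c.2.2.1, c.2.2.2)
        else if PySem.List.pyGetD (List.map (fun j => PySem.List.pyGetD (PySem.List.pyGetD spectra j []) cj 0) (PySem.List.pyRange 0 ((spectra.length : Nat) : Int) 1)) i 0 = 1 ∧ PySem.List.pyGetD error_vector i 0 = 0 then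
          (c.1, c.2.1 + 1, c.2.2.1, c.2.2.2)
        else if PySem.List.pyGetD (List.map (fun j => PySem.List.pyGetD (PySem.List.pyGetD spectra j []) cj 0) (PySem.List.pyRange 0 ((spectra.length : Nat) : Int) 1)) i 0 = 0 ∧ PySem.List.pyGetD error_vector i 0 = 1 then
          (c.1, c.2.1, c.2.2.1 + 1, c.2.2.2)
        else (c.1, c.2.1, c.2.2.1, c.2.2.2 + 1))
      ((0 : Int), (0 : Int), (0 : Int), (0 : Int))
      = (PySem.List.pyRange 0 ((spectra.length : Nat) : Int) 1).foldl
      (fun (c : Int × Int × Int × Int) i =>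
        if PySem.List.pyGetD (PySem.List.pyGetD spectra i []) cj 0 = 1 ∧ PySem.List.pyGetD error_vector i 0 = 1 then
          (c.1 + 1, c.2.1, c.2.2.1, c.2.2.2)
        else if PySem.List.pyGetD (PySem.List.pyGetD spectra i []) cj 0 = 1 ∧ PySem.List.pyGetD error_vector i 0 = 0 then
          (c.1, c.2.1 + 1, c.2.2.1, c.2.2.2)
        else if PySem.List.pyGetD (PySem.List.pyGetD spectra i []) cj 0 = 0 ∧ PySem.List.pyGetD error_vector i 0 = 1 then
          (c.1, c.2.1, c.2.2.1 + 1, c.2.2.2)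
        else (c.1, c.2.1, c.2.2.1, c.2.2.2 + 1))
      ((0 : Int), (0 : Int), (0 : Int), (0 : Int)) := by
    apply PySem.List.foldl_congr_mem
    intro c i hi
    rw [PySem.List.mem_pyRange_one] at hi
    rw [PySem.List.pyGetD_map_pyRange_of_nonneg _ _ _ _ hi.1 hi.2]
  have hn' : (((List.map (fun j => PySem.List.pyGetD (PySem.List.pyGetD spectra j []) cj 0) (PySem.List.pyRange 0 ((spectra.length : Nat) : Int) 1)).length : Nat) : Int) = ((spectra.length : Nat) : Int) := by
    simp only [List.length_map, PySem.List.length_pyRange_one]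
    omega
  show (PySem.List.pyRange 0 (((List.map (fun j => PySem.List.pyGetD (PySem.List.pyGetD spectra j []) cj 0) (PySem.List.pyRange 0 ((spectra.length : Nat) : Int) 1)).length : Nat) : Int) 1).foldl _ _ = _
  rw [hn']
  exact h2.trans (pv_counts_fold _ _ _)

-- A equals the fourfold map of the closed form
theorem pv_A_char (spectra : List (List Int)) (error_vector : List Int) :
    calculate_dichotomy_matrix spectra error_vector
    = [(PySem.List.pyRange 0 (PySem.List.len (PySem.List.pyGetD spectra 0 [])) 1).map
         (fun cj => (pvG spectra error_vector cj).1),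
       (PySem.List.pyRange 0 (PySem.List.len (PySem.List.pyGetD spectra 0 [])) 1).map
         (fun cj => (pvG spectra error_vector cj).2.1),
       (PySem.List.pyRange 0 (PySem.List.len (PySem.List.pyGetD spectra 0 [])) 1).map
         (fun cj => (pvG spectra error_vector cj).2.2.1),
       (PySem.List.pyRange 0 (PySem.List.len (PySem.List.pyGetD spectra 0 [])) 1).map
         (fun cj => (pvG spectra error_vector cj).2.2.2)] := by
  unfold calculate_dichotomy_matrix
  have hfold :
      (PySem.List.pyRange 0 (PySem.List.len (PySem.List.pyGetD spectra 0 [])) 1).foldl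
        (fun (dm : List Int × List Int × List Int × List Int) cj =>
          let cj_vector := (PySem.List.pyRange 0 (PySem.List.len spectra) 1).map
            (fun i => PySem.List.pyGetD (PySem.List.pyGetD spectra i []) cj 0)
          let c := (PySem.List.pyRange 0 (PySem.List.len cj_vector) 1).foldl
            (fun (c : Int × Int × Int × Int) i =>
              if PySem.List.pyGetD cj_vector i 0 = 1 ∧ PySem.List.pyGetD error_vector i 0 = 1 then
                (c.1 + 1, c.2.1, c.2.2.1, c.2.2.2)
              else if PySem.List.pyGetD cj_vector i 0 = 1 ∧ PySem.List.pyGetD error_vector i 0 = 0 then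
                (c.1, c.2.1 + 1, c.2.2.1, c.2.2.2)
              else if PySem.List.pyGetD cj_vector i 0 = 0 ∧ PySem.List.pyGetD error_vector i 0 = 1 then
                (c.1, c.2.1, c.2.2.1 + 1, c.2.2.2)
              else (c.1, c.2.1, c.2.2.1, c.2.2.2 + 1))
            ((0 : Int), (0 : Int), (0 : Int), (0 : Int))
          (dm.1 ++ [c.1], dm.2.1 ++ [c.2.1], dm.2.2.1 ++ [c.2.2.1], dm.2.2.2 ++ [c.2.2.2]))
        ([], [], [], [])
      = (PySem.List.pyRange 0 (PySem.List.len (PySem.List.pyGetD spectra 0 [])) 1).foldl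
        (fun (dm : List Int × List Int × List Int × List Int) cj =>
          (dm.1 ++ [(pvG spectra error_vector cj).1],
           dm.2.1 ++ [(pvG spectra error_vector cj).2.1],
           dm.2.2.1 ++ [(pvG spectra error_vector cj).2.2.1],
           dm.2.2.2 ++ [(pvG spectra error_vector cj).2.2.2])) ([], [], [], []) := by
    apply PySem.List.foldl_congr_mem
    intro dm cj _
    simp only
    rw [pv_colA spectra error_vector cj]
  rw [hfold, pv_foldl_app4]
  simp

-- ===== VERDICT (by name: the statement is the Claim_ definition above) =====
theorem calculate_dichotomy_matrix_spec : Claim_equal_calculate_dichotomy_matrix := by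
  intro spectra error_vector _hdom _hpre
  unfold Spec_calculate_dichotomy_matrix
  rw [pv_A_char]
  unfold calculate_dichotomy_matrix_alt
  simp only
  have hz : ∀ (f g h : Int → Int) (L : List Int),
      ((L.map f).zip ((L.map g).zip (L.map h))).map
        (fun t => PySem.List.len spectra - t.1 - t.2.1 - t.2.2)
      = L.map (fun cj => PySem.List.len spectra - f cj - g cj - h cj) := by
    intro f g h L
    rw [List.zip_map', List.zip_map', List.map_map]
    rfl
  rw [hz]
  congr 1
  · exact List.map_congr_left fun cj _ => (pv_count_fold _ _ _ _ _).symm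
  congr 1
  · exact List.map_congr_left fun cj _ => (pv_count_fold _ _ _ _ _).symm
  congr 1
  · exact List.map_congr_left fun cj _ => (pv_count_fold _ _ _ _ _).symm
  congr 1
  exact List.map_congr_left fun cj _ => by
    simp only [pvG]
    rw [← pv_count_fold, ← pv_count_fold, ← pv_count_fold]
    rfl
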